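-- pv_equiv track=rewrite | github.com/mengnemojohan/numina-lean-agent | scripts/extract_sublemmas.py | extract_statement_and_proof_from_code
-- ===== SOURCE A (Python) =====
-- def extract_statement_and_proof_from_code(
--
--     code: str,
-- ) -> tuple[str, str] | None:
--     """
--     example:
--         'have : 1 + 1 = 2 := by sorry'      ->      ('have : 1 + 1 = 2', 'by sorry')
--     """
--     if ":=" not in code:
--         return None
--
--     search_start = 0
--     paren_count = 0
--     bracket_count = 0
--     brace_count = 0
--
--     for i in range(search_start, len(code)):
--         char = code[i]
--
--         if char in "([{":
--             if char == "(":
--                 paren_count += 1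
--             elif char == "[":
--                 bracket_count += 1
--             elif char == "{":
--                 brace_count += 1
--         elif char in ")]}":
--             if char == ")":
--                 paren_count -= 1
--             elif char == "]":
--                 bracket_count -= 1
--             elif char == "}":
--                 brace_count -= 1
--         elif char == ":" and i + 1 < len(code) and code[i + 1] == "=":
--             if paren_count == 0 and bracket_count == 0 and brace_count == 0:
--                 statement = code[:i].strip()
--                 proof = code[i + 2:].strip()
--                 return (statement, proof)
--
--     parts = code.split(":=", maxsplit=1)
--     statement = parts[0].strip()
--     proof = parts[1].strip() if len(parts) == 2 else ""
--     return (statement, proof)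
-- ===== SOURCE B (Python) =====
-- def extract_statement_and_proof_from_code(
--     code: str,
-- ) -> tuple[str, str] | None:
--     """Find-candidates-then-recheck: jump between ":=" occurrences with str.find
--     and test prefix balance with str.count, instead of A's stateful char scan."""
--     if ":=" not in code:
--         return None
--
--     idx = code.find(":=")
--     while idx != -1:
--         p = code[:idx]
--         if (
--             p.count("(") == p.count(")")
--             and p.count("[") == p.count("]")
--             and p.count("{") == p.count("}")
--         ):
--             return (p.strip(), code[idx + 2:].strip())
--         idx = code.find(":=", idx + 1)
--
--     parts = code.split(":=", maxsplit=1)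
--     statement = parts[0].strip()
--     proof = parts[1].strip() if len(parts) == 2 else ""
--     return (statement, proof)
-- ===== Notes on version B (the rewrite author's own statement) =====
-- stated objective: alternative
-- what changed: Replaces A's single stateful scan carrying three incremental bracket counters with a find-next-":="-occurrence loop that rechecks the whole prefix's bracket-pair counts with str.count at each candidate.
import Mathlib
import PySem

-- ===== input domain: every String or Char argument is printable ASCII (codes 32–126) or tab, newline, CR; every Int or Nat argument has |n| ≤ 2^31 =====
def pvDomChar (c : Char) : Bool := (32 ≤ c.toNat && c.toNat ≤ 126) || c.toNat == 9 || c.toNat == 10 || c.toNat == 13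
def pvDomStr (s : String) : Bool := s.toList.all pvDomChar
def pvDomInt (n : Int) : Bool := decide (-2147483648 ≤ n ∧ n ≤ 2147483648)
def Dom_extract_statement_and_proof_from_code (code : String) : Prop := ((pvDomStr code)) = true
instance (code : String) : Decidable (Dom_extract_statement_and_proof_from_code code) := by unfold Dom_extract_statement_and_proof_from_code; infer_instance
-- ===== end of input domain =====

-- B replaces A's stateful three-counter scan by a find-next-":="-then-recheck-prefix-counts loop; alternative decomposition, same results.
-- Both Pythons share the identical trailing fallback (code.split(":=", 1)); it is ported once as pvFallbackSplit.

-- ===== PORT A =====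
-- fallback block shared verbatim by both Pythons:
--   parts = code.split(":=", maxsplit=1); statement = parts[0].strip(); proof = parts[1].strip() if len(parts)==2 else ""
def pvFallbackSplit (code : String) : String × String :=
  let parts := (PySem.Str.splitMax? code ":=" 1).getD []
  (PySem.Str.strip (parts.getD 0 ""),
   if parts.length = 2 then PySem.Str.strip (parts.getD 1 "") else "")

-- the for-loop of A: pre = code[:i] built so far, rest = code[i:], with the three running counters
def pvLoopA (pre : List Char) : List Char → Int → Int → Int → Option (String × String)
  | [], _, _, _ => none
  | c :: rest, p, b, r =>
    if c = '(' then pvLoopA (pre ++ [c]) rest (p + 1) b r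
    else if c = '[' then pvLoopA (pre ++ [c]) rest p (b + 1) r
    else if c = '{' then pvLoopA (pre ++ [c]) rest p b (r + 1)
    else if c = ')' then pvLoopA (pre ++ [c]) rest (p - 1) b r
    else if c = ']' then pvLoopA (pre ++ [c]) rest p (b - 1) r
    else if c = '}' then pvLoopA (pre ++ [c]) rest p b (r - 1)
    else if c = ':' ∧ rest.head? = some '=' then
      if p = 0 ∧ b = 0 ∧ r = 0 then
        some (String.ofList (PySem.Chars.strip pre),
              String.ofList (PySem.Chars.strip (rest.drop 1)))
      else pvLoopA (pre ++ [c]) rest p b r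
    else pvLoopA (pre ++ [c]) rest p b r

def extract_statement_and_proof_from_code (code : String) : Option (String × String) :=
  if PySem.Str.isIn ":=" code then
    match pvLoopA [] code.toList 0 0 0 with
    | some res => some res
    | none => some (pvFallbackSplit code)
  else none

-- ===== PORT B =====
-- Source B's while loop: code.find(":=", idx+1) is ported as the structural scan to the next
-- ":=" occurrence (exact: find returns the next such index, -1/[] ends the loop);
-- at each candidate the WHOLE prefix's bracket-pair counts are recomputed with List.count (= str.count).
def pvLoopB (pre : List Char) : List Char → Option (String × String)
  | [] => none
  | c :: rest =>
    if c = ':' ∧ rest.head? = some '=' then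
      if pre.count '(' = pre.count ')' ∧ pre.count '[' = pre.count ']' ∧ pre.count '{' = pre.count '}' then
        some (String.ofList (PySem.Chars.strip pre),
              String.ofList (PySem.Chars.strip (rest.drop 1)))
      else pvLoopB (pre ++ [c]) rest
    else pvLoopB (pre ++ [c]) rest

def extract_statement_and_proof_from_code_alt (code : String) : Option (String × String) :=
  if PySem.Str.isIn ":=" code then
    match pvLoopB [] code.toList with
    | some res => some res
    | none => some (pvFallbackSplit code)
  else none

-- ===== PRECONDITION & SPEC =====
def Spec_extract_statement_and_proof_from_code (code : String) (out : Option (String × String)) : Prop := out = extract_statement_and_proof_from_code_alt code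
instance (code : String) (out : Option (String × String)) : Decidable (Spec_extract_statement_and_proof_from_code code out) := by unfold Spec_extract_statement_and_proof_from_code; infer_instance

-- ===== CLAIM (what is proved, stated in full; the proofs are below) =====
def Claim_equal_extract_statement_and_proof_from_code : Prop := ∀ (code : String), Dom_extract_statement_and_proof_from_code code → Spec_extract_statement_and_proof_from_code code (extract_statement_and_proof_from_code code)

-- ===== LEMMAS AND PROOFS =====

-- A's running counters always equal the bracket-count differences of the prefix built so far,
-- so the two loops return the same result.
theorem pv_count_append_ne (pre : List Char) (c x : Char) (h : c ≠ x) :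
    (pre ++ [c]).count x = pre.count x := by
  simp [List.count_append, h]

theorem pv_count_append_eq (pre : List Char) (c : Char) :
    (pre ++ [c]).count c = pre.count c + 1 := by
  simp [List.count_append]

theorem pvLoop_eq : ∀ (rest pre : List Char) (p b r : Int),
    p = (pre.count '(' : Int) - pre.count ')' →
    b = (pre.count '[' : Int) - pre.count ']' →
    r = (pre.count '{' : Int) - pre.count '}' →
    pvLoopA pre rest p b r = pvLoopB pre rest := by
  intro rest
  induction rest with
  | nil => intro pre p b r _ _ _; rfl
  | cons c rest ih =>
    intro pre p b r hp hb hr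
    simp only [pvLoopA, pvLoopB]
    by_cases h1 : c = '('
    · rw [if_pos h1, if_neg (by simp [h1])]
      exact ih _ _ _ _ (by subst h1; rw [pv_count_append_eq, pv_count_append_ne _ _ _ (by decide)]; omega)
        (by subst h1; rw [pv_count_append_ne _ _ _ (by decide), pv_count_append_ne _ _ _ (by decide)]; omega)
        (by subst h1; rw [pv_count_append_ne _ _ _ (by decide), pv_count_append_ne _ _ _ (by decide)]; omega)
    rw [if_neg h1]
    by_cases h2 : c = '['
    · rw [if_pos h2, if_neg (by simp [h2])]
      exact ih _ _ _ _ (by subst h2; rw [pv_count_append_ne _ _ _ (by decide), pv_count_append_ne _ _ _ (by decide)]; omega)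
        (by subst h2; rw [pv_count_append_eq, pv_count_append_ne _ _ _ (by decide)]; omega)
        (by subst h2; rw [pv_count_append_ne _ _ _ (by decide), pv_count_append_ne _ _ _ (by decide)]; omega)
    rw [if_neg h2]
    by_cases h3 : c = '{'
    · rw [if_pos h3, if_neg (by simp [h3])]
      exact ih _ _ _ _ (by subst h3; rw [pv_count_append_ne _ _ _ (by decide), pv_count_append_ne _ _ _ (by decide)]; omega)
        (by subst h3; rw [pv_count_append_ne _ _ _ (by decide), pv_count_append_ne _ _ _ (by decide)]; omega)
        (by subst h3; rw [pv_count_append_eq, pv_count_append_ne _ _ _ (by decide)]; omega)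
    rw [if_neg h3]
    by_cases h4 : c = ')'
    · rw [if_pos h4, if_neg (by simp [h4])]
      exact ih _ _ _ _ (by subst h4; rw [pv_count_append_ne _ _ _ (by decide), pv_count_append_eq]; omega)
        (by subst h4; rw [pv_count_append_ne _ _ _ (by decide), pv_count_append_ne _ _ _ (by decide)]; omega)
        (by subst h4; rw [pv_count_append_ne _ _ _ (by decide), pv_count_append_ne _ _ _ (by decide)]; omega)
    rw [if_neg h4]
    by_cases h5 : c = ']'
    · rw [if_pos h5, if_neg (by simp [h5])]
      exact ih _ _ _ _ (by subst h5; rw [pv_count_append_ne _ _ _ (by decide), pv_count_append_ne _ _ _ (by decide)]; omega)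
        (by subst h5; rw [pv_count_append_ne _ _ _ (by decide), pv_count_append_eq]; omega)
        (by subst h5; rw [pv_count_append_ne _ _ _ (by decide), pv_count_append_ne _ _ _ (by decide)]; omega)
    rw [if_neg h5]
    by_cases h6 : c = '}'
    · rw [if_pos h6, if_neg (by simp [h6])]
      exact ih _ _ _ _ (by subst h6; rw [pv_count_append_ne _ _ _ (by decide), pv_count_append_ne _ _ _ (by decide)]; omega)
        (by subst h6; rw [pv_count_append_ne _ _ _ (by decide), pv_count_append_ne _ _ _ (by decide)]; omega)
        (by subst h6; rw [pv_count_append_ne _ _ _ (by decide), pv_count_append_eq]; omega)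
    rw [if_neg h6]
    have hne : ∀ x : Char, c ≠ x → (pre ++ [c]).count x = pre.count x :=
      fun x hx => pv_count_append_ne pre c x hx
    have hrec : pvLoopA (pre ++ [c]) rest p b r = pvLoopB (pre ++ [c]) rest :=
      ih _ _ _ _ (by rw [hne _ h1, hne _ h4]; exact hp) (by rw [hne _ h2, hne _ h5]; exact hb)
        (by rw [hne _ h3, hne _ h6]; exact hr)
    by_cases h7 : c = ':' ∧ rest.head? = some '='
    · rw [if_pos h7, if_pos h7]
      by_cases hbal : pre.count '(' = pre.count ')' ∧ pre.count '[' = pre.count ']' ∧ pre.count '{' = pre.count '}'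
      · rw [if_pos (by omega : p = 0 ∧ b = 0 ∧ r = 0), if_pos hbal]
      · rw [if_neg (by omega : ¬ (p = 0 ∧ b = 0 ∧ r = 0)), if_neg hbal]
        exact hrec
    · rw [if_neg h7, if_neg h7]
      exact hrec

theorem extract_statement_and_proof_from_code_spec : Claim_equal_extract_statement_and_proof_from_code := by
  intro code _
  unfold Spec_extract_statement_and_proof_from_code
  unfold extract_statement_and_proof_from_code extract_statement_and_proof_from_code_alt
  rw [pvLoop_eq code.toList [] 0 0 0 rfl rfl rfl]
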